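-- pv_equiv track=rewrite | github.com/luisaceituno/advent-of-code-2023 | puzzles/day13/part1.py | reflection_point
-- ===== SOURCE A (Python) =====
-- def reflection_point(items: list):
--     mirror = list(reversed(items))
--     for i in range(1, len(items) - 1):
--         max_len = min(i, len(items) - i)
--         sub_orig = items[i - max_len : i]
--         sub_mirr = mirror[-i - max_len : -i]
--         if sub_orig == sub_mirr:
--             return i
--     return 0
-- ===== SOURCE B (Python) =====
-- def reflection_point(items: list):
--     n = len(items)
--     # Manacher (even-centers variant): compute rad[c] = largest r with
--     # items[c-r:c] == list(reversed(items[c:c+r])) in amortized linear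
--     # row-comparisons by reusing mirrored radii inside the rightmost known
--     # palindromic window items[l:r]; answer as soon as a center is covered.
--     rad = []
--     append = rad.append
--     l = r = 0
--     n1 = n - 1
--     for c in range(n + 1):
--         k = min(r - c, rad[l + r - c]) if c < r else 0
--         while k < c and c + k < n and items[c - k - 1] == items[c + k]:
--             k += 1
--         if (k >= c or k + c >= n) and 1 <= c < n1:
--             return c
--         append(k)
--         if c + k > r:
--             l, r = c - k, c + k
--     return 0
-- ===== Notes on version B (the rewrite author's own statement) =====
-- stated objective: faster
-- what changed: Instead of comparing two freshly-sliced sublists against a reversed copy for every candidate line, B runs a Manacher-style pass that computes the even-palindrome radius at every center in amortized linear row-comparisons (reusing mirrored radii inside the rightmost palindromic window), then returns the first line whose radius covers it.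
import Mathlib
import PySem

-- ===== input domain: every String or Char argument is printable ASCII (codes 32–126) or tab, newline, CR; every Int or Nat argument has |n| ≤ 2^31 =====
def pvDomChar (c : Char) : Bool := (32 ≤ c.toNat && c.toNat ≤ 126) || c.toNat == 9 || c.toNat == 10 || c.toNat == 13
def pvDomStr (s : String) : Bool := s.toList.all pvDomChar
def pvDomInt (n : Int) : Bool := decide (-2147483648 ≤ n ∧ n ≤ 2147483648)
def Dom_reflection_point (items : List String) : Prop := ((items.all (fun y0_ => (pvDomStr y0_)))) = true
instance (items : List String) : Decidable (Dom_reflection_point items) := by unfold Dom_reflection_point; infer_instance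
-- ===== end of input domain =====

-- B replaces A's per-line slice comparison against a reversed copy by a Manacher-style
-- radius array (reusing mirrored radii inside the rightmost palindromic window), then
-- scans for the first line whose radius covers it (objective: faster, asymptotic).

-- ===== PORT A =====
-- the 'for i in range(1, len(items)-1)' loop: first i whose slices match, else 0
def pvALoop (items mirror : List String) : List Int → Int
  | [] => 0
  | i :: rest =>
    let max_len := min i ((items.length : Int) - i)
    let sub_orig := PySem.List.slice items (some (i - max_len)) (some i)
    let sub_mirr := PySem.List.slice mirror (some (-i - max_len)) (some (-i))
    if sub_orig = sub_mirr then i else pvALoop items mirror rest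

def reflection_point (items : List String) : Int :=
  let mirror := items.reverse
  pvALoop items mirror (PySem.List.pyRange 1 ((items.length : Int) - 1) 1)

-- ===== PORT B =====
-- the 'while k < c and c + k < n and items[c-k-1] == items[c+k]: k += 1' loop
def pvBextend (items : List String) (c k : Int) : Int :=
  if k < c ∧ c + k < (items.length : Int) ∧
      PySem.List.pyGetD items (c - k - 1) "" = PySem.List.pyGetD items (c + k) "" then
    pvBextend items c (k + 1)
  else k
termination_by (c - k).toNat
decreasing_by omega

-- the 'for c in range(n + 1)' loop over the state (rad, l, r), returning c as soon
-- as its radius k covers line c (k >= min(c, n - c), tested without min), else 0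
def pvBloop (items : List String) (s : List Int × Int × Int) : List Int → Int
  | [] => 0
  | c :: rest =>
    let k0 := if c < s.2.2 then min (s.2.2 - c) (PySem.List.pyGetD s.1 (s.2.1 + s.2.2 - c) 0) else 0
    let k := pvBextend items c k0
    if (c ≤ k ∨ (items.length : Int) ≤ k + c) ∧ 1 ≤ c ∧ c < (items.length : Int) - 1 then c
    else
      pvBloop items
        (if s.2.2 < c + k then (s.1 ++ [k], c - k, c + k) else (s.1 ++ [k], s.2.1, s.2.2)) rest

def reflection_point_alt (items : List String) : Int :=
  pvBloop items ([], 0, 0) (PySem.List.pyRange 0 ((items.length : Int) + 1) 1)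

-- ===== PRECONDITION & SPEC =====
def Spec_reflection_point (items : List String) (out : Int) : Prop := out = reflection_point_alt items
instance (items : List String) (out : Int) : Decidable (Spec_reflection_point items out) := by unfold Spec_reflection_point; infer_instance

-- ===== CLAIM (what is proved, stated in full; the proofs are below) =====
def Claim_equal_reflection_point : Prop := ∀ (items : List String), Dom_reflection_point items → Spec_reflection_point items (reflection_point items)

-- ===== LEMMAS AND PROOFS =====

-- the pointwise mirror condition at line i, checked to depth m
def pvGood (items : List String) (i m : Nat) : Prop :=
  ∀ t, t < m → items.getD (i - 1 - t) "" = items.getD (i + t) ""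

-- k is THE even-palindrome radius at center c: valid to depth k and blocked at depth k
def pvExact (items : List String) (c k : Nat) : Prop :=
  k ≤ c ∧ c + k ≤ items.length ∧ pvGood items c k ∧
  (k = c ∨ c + k = items.length ∨ items.getD (c - 1 - k) "" ≠ items.getD (c + k) "")

lemma pvGood_mono (items : List String) (c : Nat) {m k : Nat} (h : k ≤ m)
    (hg : pvGood items c m) : pvGood items c k := fun t ht => hg t (by omega)

lemma pvGetD_cast (items : List String) (u : Nat) (hu : u < items.length) :
    PySem.List.pyGetD items (u : Int) "" = items.getD u "" := by
  rw [PySem.List.pyGetD_eq_getElem items "" (by omega) (by exact_mod_cast hu),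
      List.getD_eq_getElem items "" (by omega)]
  congr 1

-- the while loop, started on a valid radius k0, computes the exact radius
lemma pvBextend_spec (items : List String) (c : Nat) :
    ∀ d k0, c - k0 = d → k0 ≤ c → c + k0 ≤ items.length → pvGood items c k0 →
    ∃ k : Nat, pvBextend items (c : Int) (k0 : Int) = (k : Int) ∧ k0 ≤ k ∧ pvExact items c k := by
  intro d
  induction d with
  | zero =>
    intro k0 hd hkc hkn hg
    have hk0c : k0 = c := by omega
    rw [pvBextend, if_neg (by rintro ⟨h, -, -⟩; omega)]
    exact ⟨k0, rfl, le_rfl, hkc, hkn, hg, Or.inl hk0c⟩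
  | succ d ih =>
    intro k0 hd hkc hkn hg
    have hklt : k0 < c := by omega
    by_cases hn : c + k0 < items.length
    · by_cases hm : items.getD (c - 1 - k0) "" = items.getD (c + k0) ""
      · rw [pvBextend, if_pos ⟨by exact_mod_cast hklt, by exact_mod_cast hn, by
          rw [show (c : Int) - k0 - 1 = ((c - 1 - k0 : Nat) : Int) by omega,
              pvGetD_cast items (c - 1 - k0) (by omega),
              show (c : Int) + k0 = ((c + k0 : Nat) : Int) by omega,
              pvGetD_cast items (c + k0) hn]
          exact hm⟩]
        rw [show (k0 : Int) + 1 = ((k0 + 1 : Nat) : Int) by push_cast; ring]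
        obtain ⟨k, h1, h2, h3⟩ := ih (k0 + 1) (by omega) (by omega) (by omega)
          (fun t ht => by
            rcases Nat.lt_or_ge t k0 with h' | h'
            · exact hg t h'
            · have : t = k0 := by omega
              subst this; exact hm)
        exact ⟨k, h1, by omega, h3⟩
      · -- blocked by a mismatch
        rw [pvBextend, if_neg (by
          rintro ⟨-, -, he⟩
          apply hm
          rw [show (c : Int) - k0 - 1 = ((c - 1 - k0 : Nat) : Int) by omega,
              pvGetD_cast items (c - 1 - k0) (by omega),
              show (c : Int) + k0 = ((c + k0 : Nat) : Int) by omega,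
              pvGetD_cast items (c + k0) hn] at he
          exact he)]
        exact ⟨k0, rfl, le_rfl, hkc, hkn, hg, Or.inr (Or.inr hm)⟩
    · -- blocked by the right boundary
      rw [pvBextend, if_neg (by rintro ⟨-, h, -⟩; omega)]
      exact ⟨k0, rfl, le_rfl, hkc, hkn, hg, Or.inr (Or.inl (by omega))⟩

-- mirror lemma: inside a known palindromic window items[L:R), the mirrored exact
-- radius capped at R - c is a valid starting radius at center c
lemma pvMirror (items : List String) (L R c k' : Nat)
    (hpal : ∀ u, L ≤ u → u < R → items.getD u "" = items.getD (L + R - 1 - u) "")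
    (hRn : R ≤ items.length) (_hLR : L ≤ R) (hcR : c < R) (h2c : L + R < 2 * c)
    (hex : pvExact items (L + R - c) k') :
    min (R - c) k' ≤ c ∧ c + min (R - c) k' ≤ items.length ∧
      pvGood items c (min (R - c) k') := by
  set c' := L + R - c with hc'
  obtain ⟨hk'c, hk'n, hg', -⟩ := hex
  refine ⟨by omega, by omega, ?_⟩
  intro t ht
  have ht1 : t < R - c := by omega
  have ht2 : t < k' := by omega
  have h1 : items.getD (c - 1 - t) "" = items.getD (c' + t) "" := by
    have := hpal (c - 1 - t) (by omega) (by omega)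
    rw [this]; congr 1; omega
  have h2 : items.getD (c + t) "" = items.getD (c' - 1 - t) "" := by
    have := hpal (c + t) (by omega) (by omega)
    rw [this]; congr 1; omega
  rw [h1, h2, hg' t ht2]

-- invariant of the outer fold after the first m centers 0..m-1 have been processed
def pvInv (items : List String) (m : Nat) (s : List Int × Int × Int) : Prop :=
  s.1.length = m ∧
  (∀ c, c < m → 0 ≤ s.1.getD c 0 ∧ pvExact items c (s.1.getD c 0).toNat) ∧
  ∃ L R : Nat, s.2.1 = (L : Int) ∧ s.2.2 = (R : Int) ∧ L ≤ R ∧ R ≤ items.length ∧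
    (∀ u, L ≤ u → u < R → items.getD u "" = items.getD (L + R - 1 - u) "") ∧
    ((L = 0 ∧ R = 0) ∨ (1 ≤ m ∧ L + R ≤ 2 * (m - 1)))

-- at center m the computed radius is exact
lemma pvK_exact (items : List String) (m : Nat) (s : List Int × Int × Int)
    (hm : m ≤ items.length) (hinv : pvInv items m s) :
    ∃ k : Nat,
      pvBextend items (m : Int)
        (if (m : Int) < s.2.2 then
          min (s.2.2 - m) (PySem.List.pyGetD s.1 (s.2.1 + s.2.2 - m) 0) else 0) = (k : Int) ∧
      pvExact items m k := by
  obtain ⟨hlen, hrad, L, R, hL, hR, hLR, hRn, hpal, hcase⟩ := hinv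
  have hstart : ∃ k0 : Nat,
      (if (m : Int) < s.2.2 then
        min (s.2.2 - m) (PySem.List.pyGetD s.1 (s.2.1 + s.2.2 - m) 0) else 0) = (k0 : Int) ∧
      k0 ≤ m ∧ m + k0 ≤ items.length ∧ pvGood items m k0 := by
    by_cases hbr : (m : Int) < s.2.2
    · rw [if_pos hbr]
      have hmR : m < R := by omega
      have h2c : L + R < 2 * m := by
        rcases hcase with ⟨h0, h0'⟩ | ⟨h1, h2⟩ <;> omega
      have hc'lt : L + R - m < m := by omega
      have hidx : s.2.1 + s.2.2 - (m : Int) = ((L + R - m : Nat) : Int) := by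
        rw [hL, hR]; omega
      obtain ⟨hpos, hex⟩ := hrad (L + R - m) (by omega)
      have hget : PySem.List.pyGetD s.1 (s.2.1 + s.2.2 - m) 0 = s.1.getD (L + R - m) 0 := by
        rw [hidx, PySem.List.pyGetD_eq_getElem s.1 0 (by omega)
              (by rw [hlen]; exact_mod_cast hc'lt),
            List.getD_eq_getElem s.1 0 (by omega)]
        congr 1
      set k' := (s.1.getD (L + R - m) 0).toNat with hk'
      obtain ⟨ha, hb, hc⟩ := pvMirror items L R m k' hpal hRn hLR hmR h2c hex
      refine ⟨min (R - m) k', ?_, ha, hb, hc⟩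
      rw [hget, hR]
      omega
    · rw [if_neg hbr]
      exact ⟨0, by norm_num, by omega, by omega, fun t ht => by omega⟩
  obtain ⟨k0, hk0eq, hk0c, hk0n, hk0g⟩ := hstart
  obtain ⟨k, hkeq, -, hkex⟩ := pvBextend_spec items m (m - k0) k0 rfl hk0c hk0n hk0g
  rw [hk0eq]
  exact ⟨k, hkeq, hkex⟩

-- the invariant carries over to the updated state
lemma pvInv_next (items : List String) (m k : Nat) (s : List Int × Int × Int)
    (hinv : pvInv items m s) (hkex : pvExact items m k) :
    pvInv items (m + 1)
      (if s.2.2 < (m : Int) + (k : Int) then (s.1 ++ [(k : Int)], (m : Int) - k, (m : Int) + k)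
       else (s.1 ++ [(k : Int)], s.2.1, s.2.2)) := by
  obtain ⟨hlen, hrad, L, R, hL, hR, hLR, hRn, hpal, hcase⟩ := hinv
  have hkm : k ≤ m := hkex.1
  have hkn : m + k ≤ items.length := hkex.2.1
  constructor
  · -- length
    split <;> simp [hlen]
  constructor
  · -- radii exact, old preserved and the new one
    intro c hc
    have hfst : (if s.2.2 < (m : Int) + k then (s.1 ++ [(k:Int)], (m:Int) - k, (m:Int) + k)
        else (s.1 ++ [(k:Int)], s.2.1, s.2.2)).1 = s.1 ++ [(k : Int)] := by split <;> rfl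
    rw [hfst]
    rcases Nat.lt_or_ge c m with hcm | hcm
    · rw [List.getD_append _ _ _ _ (by omega)]
      exact hrad c hcm
    · have hcm' : c = m := by omega
      rw [hcm']
      have hgd : (s.1 ++ [(k : Int)]).getD m 0 = (k : Int) := by
        rw [List.getD_eq_getElem _ 0 (by simp [hlen]),
            List.getElem_append_right (by omega)]
        simp [hlen]
      rw [hgd]
      exact ⟨by omega, by rw [Int.toNat_natCast]; exact hkex⟩
  · -- the window
    by_cases hupd : s.2.2 < (m : Int) + k
    · rw [if_pos hupd]
      refine ⟨m - k, m + k, by simp; omega, by simp, by omega, by omega, ?_,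
        Or.inr ⟨by omega, by omega⟩⟩
      intro u hu1 hu2
      have hg := hkex.2.2.1
      have harith : m - k + (m + k) - 1 - u = 2 * m - 1 - u := by omega
      rw [harith]
      rcases Nat.lt_or_ge u m with hum | hum
      · have := hg (m - 1 - u) (by omega)
        rw [show m - 1 - (m - 1 - u) = u by omega] at this
        rw [this]; congr 1; omega
      · have := hg (u - m) (by omega)
        rw [show m + (u - m) = u by omega] at this
        rw [← this]; congr 1; omega
    · rw [if_neg hupd]
      refine ⟨L, R, hL, hR, hLR, hRn, hpal, ?_⟩
      rcases hcase with ⟨h0, h0'⟩ | ⟨h1, h2⟩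
      · left; exact ⟨h0, h0'⟩
      · right; exact ⟨by omega, by omega⟩

-- A's slice condition at line i is the pointwise mirror condition to full depth
lemma pvCondA_iff (items : List String) (i : Nat) (hi1 : 1 ≤ i) (hin : i + 1 < items.length) :
    (PySem.List.slice items (some ((i : Int) - min (i : Int) ((items.length : Int) - i))) (some (i : Int)) =
     PySem.List.slice items.reverse
       (some (-(i : Int) - min (i : Int) ((items.length : Int) - i))) (some (-(i : Int)))) ↔
    pvGood items i (min i (items.length - i)) := by
  obtain ⟨m, hm⟩ : ∃ m, m = min i (items.length - i) := ⟨_, rfl⟩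
  rw [← hm]
  have hmL : min (i : Int) ((items.length : Int) - i) = (m : Int) := by omega
  have hm1 : 1 ≤ m := by omega
  have himn : i + m ≤ items.length := by omega
  have hmi : m ≤ i := by omega
  have h1 : PySem.List.slice items (some ((i : Int) - min (i : Int) ((items.length : Int) - i))) (some (i : Int)) =
      (items.drop (i - m)).take m := by
    rw [hmL, PySem.List.slice_of_nonneg items (by omega) (by omega) (by omega) (by omega)]
    congr 1
    · omega
    · congr 1; omega
  have h2 : PySem.List.slice items.reverse
      (some (-(i : Int) - min (i : Int) ((items.length : Int) - i))) (some (-(i : Int))) =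
      (items.reverse.drop (items.length - (i + m))).take m := by
    rw [hmL]
    have ha : -(i : Int) - (m : Int) = -(((i + m : Nat) : Int)) := by push_cast; ring
    have hb : -(i : Int) = -(((i : Nat) : Int)) := by norm_num
    rw [ha, hb]
    simp only [PySem.List.slice, List.length_reverse,
      PySem.List.clampIdx_neg_natCast items.length (i + m) (by omega),
      PySem.List.clampIdx_neg_natCast items.length i (by omega)]
    congr 1
    omega
  rw [h1, h2]
  have hlen1 : ((items.drop (i - m)).take m).length = m := by
    simp [List.length_take, List.length_drop]; omega
  have hlen2 : ((items.reverse.drop (items.length - (i + m))).take m).length = m := by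
    simp [List.length_take, List.length_drop, List.length_reverse]; omega
  constructor
  · intro h t ht
    have := List.getElem_of_eq h (by omega : m - 1 - t < ((items.drop (i - m)).take m).length)
    rw [List.getElem_take, List.getElem_drop, List.getElem_take, List.getElem_drop,
        List.getElem_reverse] at this
    rw [List.getD_eq_getElem items "" (by omega), List.getD_eq_getElem items "" (by omega)]
    calc items[i - 1 - t]'(by omega) = items[i - m + (m - 1 - t)]'(by omega) := by congr 1; omega
      _ = items[items.length - 1 - (items.length - (i + m) + (m - 1 - t))]'(by omega) := this
      _ = items[i + t]'(by omega) := by congr 1; omega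
  · intro h
    apply List.ext_getElem (by omega)
    intro t ht1 ht2
    rw [List.getElem_take, List.getElem_drop, List.getElem_take, List.getElem_drop,
        List.getElem_reverse]
    have ht : t < m := by omega
    have := h (m - 1 - t) (by omega)
    rw [List.getD_eq_getElem items "" (by omega), List.getD_eq_getElem items "" (by omega)] at this
    calc items[i - m + t]'(by omega) = items[i - 1 - (m - 1 - t)]'(by omega) := by congr 1; omega
      _ = items[i + (m - 1 - t)]'(by omega) := this
      _ = items[items.length - 1 - (items.length - (i + m) + t)]'(by omega) := by congr 1; omega

-- with an exact radius at i, the scan test is the pointwise mirror condition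
lemma pvExact_min_le (items : List String) (i k : Nat)
    (_hi1 : 1 ≤ i) (hin : i + 1 < items.length) (hex : pvExact items i k) :
    (pvGood items i (min i (items.length - i)) ↔ min i (items.length - i) ≤ k) := by
  obtain ⟨hkc, hkn, hg, hb⟩ := hex
  constructor
  · intro h
    by_contra hlt
    have hkm : k < min i (items.length - i) := by omega
    rcases hb with hc | hc | hc
    · omega
    · omega
    · exact hc (h k hkm)
  · intro h
    exact pvGood_mono items i (by omega) hg

-- B's merged loop from center m equals A's loop over the remaining candidate lines
lemma pvBloop_eq (items : List String) :
    ∀ d m (s : List Int × Int × Int), items.length + 1 - m = d → m ≤ items.length + 1 →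
    pvInv items m s →
    pvBloop items s (PySem.List.pyRange (m : Int) ((items.length : Int) + 1) 1) =
      pvALoop items items.reverse
        (PySem.List.pyRange (max (m : Int) 1) ((items.length : Int) - 1) 1) := by
  intro d
  induction d with
  | zero =>
    intro m s hd hm hinv
    rw [PySem.List.pyRange_one_eq_nil (by omega),
        PySem.List.pyRange_one_eq_nil (by omega)]
    rfl
  | succ d ih =>
    intro m s hd hm hinv
    have hmn : m ≤ items.length := by omega
    obtain ⟨k, hkeq, hkex⟩ := pvK_exact items m s hmn hinv
    rw [PySem.List.pyRange_one_cons (by omega)]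
    simp only [pvBloop]
    rw [hkeq]
    by_cases hC : ((m : Int) ≤ k ∨ (items.length : Int) ≤ (k : Int) + m) ∧ 1 ≤ (m : Int) ∧
        (m : Int) < (items.length : Int) - 1
    · rw [if_pos hC]
      obtain ⟨h3, h1, h2⟩ := hC
      have h3' : min (m : Int) ((items.length : Int) - m) ≤ (k : Int) := by omega
      have hgood : pvGood items m (min m (items.length - m)) :=
        (pvExact_min_le items m k (by omega) (by omega) hkex).mpr (by omega)
      rw [show max (m : Int) 1 = (m : Int) by omega,
          PySem.List.pyRange_one_cons (by omega)]
      simp only [pvALoop]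
      rw [if_pos ((pvCondA_iff items m (by omega) (by omega)).mpr hgood)]
    · rw [if_neg hC]
      have hnext := pvInv_next items m k s hinv hkex
      have hrec := ih (m + 1) _ (by omega) (by omega) hnext
      rw [show (m : Int) + 1 = ((m + 1 : Nat) : Int) by push_cast; ring, hrec]
      rcases Nat.eq_zero_or_pos m with hm0 | hm1
      · subst hm0
        norm_num
      · rcases Int.lt_or_le (m : Int) ((items.length : Int) - 1) with hlt | hge
        · -- m is a candidate line whose radius does not cover it: A skips it too
          have hk : (k : Int) < min (m : Int) ((items.length : Int) - m) := by
            by_contra hk'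
            exact hC ⟨by omega, by omega, hlt⟩
          have hnotgood : ¬ pvGood items m (min m (items.length - m)) := by
            intro hg
            have := (pvExact_min_le items m k (by omega) (by omega) hkex).mp hg
            omega
          have hskip : pvALoop items items.reverse
              (PySem.List.pyRange (m : Int) ((items.length : Int) - 1) 1) =
              pvALoop items items.reverse
                (PySem.List.pyRange ((m : Int) + 1) ((items.length : Int) - 1) 1) := by
            rw [PySem.List.pyRange_one_cons (by omega)]
            simp only [pvALoop]
            rw [if_neg (fun hc => hnotgood ((pvCondA_iff items m (by omega) (by omega)).mp hc))]
          rw [show max (m : Int) 1 = (m : Int) by omega, hskip,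
              show (m : Int) + 1 = ((m + 1 : Nat) : Int) by push_cast; ring,
              show max (((m + 1 : Nat)) : Int) 1 = ((m + 1 : Nat) : Int) by omega]
        · -- past the last candidate line: both remaining ranges are empty
          rw [PySem.List.pyRange_one_eq_nil (by omega),
              PySem.List.pyRange_one_eq_nil (by omega)]

-- ===== VERDICT (by name: the statement is the Claim_ definition above) =====
theorem reflection_point_spec : Claim_equal_reflection_point := by
  intro items _
  unfold Spec_reflection_point
  simp only [reflection_point, reflection_point_alt]
  have h := pvBloop_eq items (items.length + 1) 0 ([], 0, 0) (by omega) (by omega)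
    ⟨rfl, fun c hc => by omega, 0, 0, rfl, rfl, le_rfl, by omega,
      fun u hu1 hu2 => by omega, Or.inl ⟨rfl, rfl⟩⟩
  rw [show ((0 : Nat) : Int) = (0 : Int) by norm_num] at h
  rw [h, show max (0 : Int) 1 = (1 : Int) by norm_num]
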